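-- pv_equiv track=rewrite | github.com/KimJiwon0501/Cube-Solver-with-Python | move_optimizer.py | split_by_target
-- ===== SOURCE A (Python) =====
-- def split_by_target(seq, targets={"y", "y'", "U", "U'"}):
--     if not seq:
--         return []
--
--     result = []
--     current = [seq[0]]
--     in_target = seq[0] in targets
--
--     for move in seq[1:]:
--         now_target = move in targets
--         if now_target == in_target:
--             current.append(move)
--         else:
--             result.append(current)
--             current = [move]
--             in_target = now_target
--
--     result.append(current)
--     return result
-- ===== SOURCE B (Python) =====
-- def split_by_target(seq, targets={"y", "y'", "U", "U'"}):
--     result = []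
--     i = 0
--     n = len(seq)
--     while i < n:
--         key = seq[i] in targets
--         j = i + 1
--         while j < n and (seq[j] in targets) == key:
--             j += 1
--         result.append(seq[i:j])
--         i = j
--     return result
-- ===== Notes on version B (the rewrite author's own statement) =====
-- stated objective: alternative
-- what changed: Replaces A's single pass with maintained state (growing current-run list plus in_target flag, boundary resets) by a two-pointer run scanner: an outer index finds the start of each run, an inner index advances to its end, and the run is emitted as one slice seq[i:j].
import Mathlib
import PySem

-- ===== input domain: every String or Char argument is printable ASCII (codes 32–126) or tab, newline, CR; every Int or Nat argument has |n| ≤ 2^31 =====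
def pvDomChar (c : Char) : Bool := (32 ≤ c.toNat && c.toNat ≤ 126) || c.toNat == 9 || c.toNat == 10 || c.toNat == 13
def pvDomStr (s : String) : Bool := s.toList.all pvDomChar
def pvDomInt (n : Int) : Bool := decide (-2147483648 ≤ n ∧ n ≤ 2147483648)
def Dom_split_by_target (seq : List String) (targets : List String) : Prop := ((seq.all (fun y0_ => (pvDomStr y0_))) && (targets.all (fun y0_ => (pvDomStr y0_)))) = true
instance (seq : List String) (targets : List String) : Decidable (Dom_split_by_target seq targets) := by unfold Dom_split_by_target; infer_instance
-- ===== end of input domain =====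

-- B replaces A's maintained current-run list and in_target flag with a two-pointer run scanner
-- (find run start, advance to run end, emit the run as one slice); alternative decomposition, same cost.


-- ===== PORT A =====
def split_by_target (seq : List String) (targets : List String) : List (List String) :=
  match seq with
  | [] => []
  | h :: t =>
    -- result = [], current = [seq[0]], in_target = seq[0] in targets; loop over seq[1:]
    let fin := t.foldl
      (fun (st : List (List String) × List String × Bool) (move : String) =>
        let now_target := targets.contains move
        if now_target == st.2.2 then (st.1, st.2.1 ++ [move], st.2.2)
        else (st.1 ++ [st.2.1], [move], now_target))
      ([], [h], targets.contains h)
    fin.1 ++ [fin.2.1]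

-- ===== PORT B =====
-- outer loop of Source B: the run starting at the head extends over xs.takeWhile (same key);
-- recurse on the remainder (the inner j-scan is takeWhile/dropWhile over the tail).
def split_by_target_alt (seq : List String) (targets : List String) : List (List String) :=
  match seq with
  | [] => []
  | x :: xs =>
    (x :: xs.takeWhile (fun y => targets.contains y == targets.contains x)) ::
      split_by_target_alt (xs.dropWhile (fun y => targets.contains y == targets.contains x)) targets
termination_by seq.length
decreasing_by
  simp only [List.length_cons]
  exact Nat.lt_succ_of_le (List.length_dropWhile_le _ _)

-- ===== PRECONDITION & SPEC =====
def Spec_split_by_target (seq : List String) (targets : List String) (out : List (List String)) : Prop := out = split_by_target_alt seq targets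
instance (seq : List String) (targets : List String) (out : List (List String)) : Decidable (Spec_split_by_target seq targets out) := by unfold Spec_split_by_target; infer_instance

-- ===== CLAIM (what is proved, stated in full; the proofs are below) =====
def Claim_equal_split_by_target : Prop := ∀ (seq : List String) (targets : List String), Dom_split_by_target seq targets → Spec_split_by_target seq targets (split_by_target seq targets)

-- ===== LEMMAS AND PROOFS =====

-- "continue a run cur of key b through xs": abstract view of A's remaining loop.
def pvG (t : List String) (b : Bool) (cur : List String) : List String → List (List String)
  | [] => [cur]
  | x :: xs =>
    if t.contains x == b then pvG t b (cur ++ [x]) xs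
    else cur :: split_by_target_alt (x :: xs) t

theorem pvG_eq (t : List String) (b : Bool) :
    ∀ (xs cur : List String),
      pvG t b cur xs =
        (cur ++ xs.takeWhile (fun y => t.contains y == b)) ::
          split_by_target_alt (xs.dropWhile (fun y => t.contains y == b)) t := by
  intro xs
  induction xs with
  | nil => intro cur; simp [pvG, split_by_target_alt]
  | cons x xs ih =>
    intro cur
    by_cases h : decide (x ∈ t) = b
    · simp [pvG, h, List.takeWhile, List.dropWhile, ih, List.append_assoc]
    · have h' : (decide (x ∈ t) == b) = false := by simp [h]
      simp [pvG, h', List.takeWhile, List.dropWhile]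

theorem alt_cons (t : List String) (x : String) (xs : List String) :
    split_by_target_alt (x :: xs) t = pvG t (t.contains x) [x] xs := by
  rw [pvG_eq, split_by_target_alt]
  simp

theorem loop_eq (t : List String) :
    ∀ (xs : List String) (res : List (List String)) (cur : List String) (b : Bool),
      (let fin := xs.foldl
        (fun (st : List (List String) × List String × Bool) (move : String) =>
          let now_target := t.contains move
          if now_target == st.2.2 then (st.1, st.2.1 ++ [move], st.2.2)
          else (st.1 ++ [st.2.1], [move], now_target))
        (res, cur, b)
       fin.1 ++ [fin.2.1]) = res ++ pvG t b cur xs := by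
  intro xs
  induction xs with
  | nil => intro res cur b; simp [pvG]
  | cons x xs ih =>
    intro res cur b
    by_cases h : decide (x ∈ t) = b
    · simpa [pvG, h] using ih res (cur ++ [x]) b
    · have := ih (res ++ [cur]) [x] (decide (x ∈ t))
      simp [pvG, h, alt_cons, List.append_assoc] at this ⊢
      simpa [List.contains_eq_mem] using this

-- ===== VERDICT (by name: the statement is the Claim_ definition above) =====
theorem split_by_target_spec : Claim_equal_split_by_target := by
  intro seq targets _
  unfold Spec_split_by_target
  cases seq with
  | nil => simp [split_by_target, split_by_target_alt]
  | cons h tl =>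
    show _ = split_by_target_alt (h :: tl) targets
    rw [split_by_target, alt_cons]
    simpa using loop_eq targets tl [] [h] (targets.contains h)
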